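-- pv_equiv track=rewrite | github.com/jieminF1994/product_illustration_automation | extract_annuity_data.py | _force_31_year_rows
-- ===== SOURCE A (Python) =====
-- from typing import Dict, List, Optional, Tuple
--
-- def _force_31_year_rows(
--     rows: List[Dict[str, str]], columns: List[str]
-- ) -> List[Dict[str, str]]:
--     row_map = {row.get("Year", ""): row for row in rows}
--     ordered_keys = ["At Issue"] + [str(i) for i in range(1, 31)]
--     output: List[Dict[str, str]] = []
--     for year_key in ordered_keys:
--         if year_key in row_map:
--             output.append(row_map[year_key])
--         else:
--             blank = {col: "" for col in columns}
--             blank["Year"] = year_key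
--             output.append(blank)
--     return output
-- ===== SOURCE B (Python) =====
-- from typing import Dict, List
--
-- def _force_31_year_rows(
--     rows: List[Dict[str, str]], columns: List[str]
-- ) -> List[Dict[str, str]]:
--     # Scatter approach: pre-build 31 blank slots plus a year->slot index,
--     # then overwrite slots from the input rows (last duplicate wins).
--     out: List[Dict[str, str]] = []
--     index: Dict[str, int] = {}
--     for i in range(31):
--         key = "At Issue" if i == 0 else str(i)
--         blank = {col: "" for col in columns}
--         blank["Year"] = key
--         index[key] = len(out)
--         out.append(blank)
--     for row in rows:
--         slot = index.get(row.get("Year", ""))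
--         if slot is not None:
--             out[slot] = row
--     return out
-- ===== Notes on version B (the rewrite author's own statement) =====
-- stated objective: alternative
-- what changed: B pre-builds the 31 blank rows together with a year->slot index and then scatters the input rows into their slots (overwriting, so last duplicate wins), instead of A's building a year->row dict and gathering a value per ordered key with a per-slot if/else.
import Mathlib
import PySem

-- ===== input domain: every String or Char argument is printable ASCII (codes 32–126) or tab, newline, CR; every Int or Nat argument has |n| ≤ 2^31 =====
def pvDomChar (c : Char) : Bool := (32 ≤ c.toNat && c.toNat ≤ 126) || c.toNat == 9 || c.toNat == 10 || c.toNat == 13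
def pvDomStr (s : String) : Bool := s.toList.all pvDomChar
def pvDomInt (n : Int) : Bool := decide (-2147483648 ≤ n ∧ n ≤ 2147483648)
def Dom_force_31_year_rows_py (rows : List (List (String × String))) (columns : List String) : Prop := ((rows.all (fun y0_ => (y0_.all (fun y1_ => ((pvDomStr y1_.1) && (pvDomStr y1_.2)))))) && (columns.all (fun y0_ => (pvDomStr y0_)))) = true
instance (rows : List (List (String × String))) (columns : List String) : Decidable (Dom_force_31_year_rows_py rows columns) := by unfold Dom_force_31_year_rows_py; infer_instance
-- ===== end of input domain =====

-- B scatters the input rows into a pre-built list of 31 blank slots via a year->slot index,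
-- instead of A's per-key gather through a year->row dict; objective: alternative decomposition, same cost.

-- ===== PORT A =====
def force_31_year_rows_py (rows : List (List (String × String))) (columns : List String) : List (List (String × String)) :=
  let row_map : PySem.Dict String (List (String × String)) :=
    rows.foldl (fun m row => m.insert ((PySem.Dict.mk row).getD "Year" "") row) PySem.Dict.empty
  let ordered_keys : List String := ["At Issue"] ++ (PySem.List.pyRange 1 31 1).map PySem.Int.toStr
  ordered_keys.foldl
    (fun output year_key =>
      if row_map.contains year_key then
        output ++ [row_map.getD year_key []]
      else
        -- blank = {col: "" for col in columns}; blank["Year"] = year_key (inlined)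
        output ++ [((columns.foldl (fun b col => b.insert col "") PySem.Dict.empty).insert "Year" year_key).items])
    []

-- ===== PORT B =====
-- first loop of Source B: build the 31 blank slots and the year->slot index
-- (key = "At Issue" if i == 0 else str(i); blank = {col: "" for col in columns}; blank["Year"] = key — inlined)
def pvInitB (columns : List String) : List (List (String × String)) × PySem.Dict String Int :=
  (PySem.List.pyRange 0 31 1).foldl
    (fun st i =>
      (st.1 ++ [((columns.foldl (fun b col => b.insert col "") PySem.Dict.empty).insert "Year" (if i == 0 then "At Issue" else PySem.Int.toStr i)).items],
       st.2.insert (if i == 0 then "At Issue" else PySem.Int.toStr i) (st.1.length : Int)))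
    ([], PySem.Dict.empty)

def force_31_year_rows_py_alt (rows : List (List (String × String))) (columns : List String) : List (List (String × String)) :=
  let init := pvInitB columns
  -- second loop of Source B: scatter rows into their slots (out[slot] = row; last wins)
  rows.foldl
    (fun out row =>
      match init.2.get? ((PySem.Dict.mk row).getD "Year" "") with
      | some slot => out.set slot.toNat row
      | none => out)
    init.1

-- ===== PRECONDITION & SPEC =====
def Spec_force_31_year_rows_py (rows : List (List (String × String))) (columns : List String) (out : List (List (String × String))) : Prop := out = force_31_year_rows_py_alt rows columns
instance (rows : List (List (String × String))) (columns : List String) (out : List (List (String × String))) : Decidable (Spec_force_31_year_rows_py rows columns out) := by unfold Spec_force_31_year_rows_py; infer_instance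

-- ===== CLAIM (what is proved, stated in full; the proofs are below) =====
def Claim_equal_force_31_year_rows_py : Prop := ∀ (rows : List (List (String × String))) (columns : List String), Dom_force_31_year_rows_py rows columns → Spec_force_31_year_rows_py rows columns (force_31_year_rows_py rows columns)

-- ===== LEMMAS AND PROOFS =====

def pvKeys31 : List String := ["At Issue"] ++ (PySem.List.pyRange 1 31 1).map PySem.Int.toStr

def pvIdx31 : PySem.Dict String Int := PySem.Dict.mk [("At Issue", (0 : Int)), ("1", 1), ("2", 2), ("3", 3), ("4", 4), ("5", 5), ("6", 6), ("7", 7), ("8", 8), ("9", 9), ("10", 10), ("11", 11), ("12", 12), ("13", 13), ("14", 14), ("15", 15), ("16", 16), ("17", 17), ("18", 18), ("19", 19), ("20", 20), ("21", 21), ("22", 22), ("23", 23), ("24", 24), ("25", 25), ("26", 26), ("27", 27), ("28", 28), ("29", 29), ("30", 30)]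

def pvYear (row : List (String × String)) : String := (PySem.Dict.mk row).getD "Year" ""

def pvBlank (columns : List String) (key : String) : List (String × String) :=
  ((columns.foldl (fun b col => b.insert col "") PySem.Dict.empty).insert "Year" key).items

-- canonical description both ports are reduced to
def pvCanon (rows : List (List (String × String))) (columns : List String) : List (List (String × String)) :=
  pvKeys31.map (fun k => (rows.reverse.find? (fun r => pvYear r == k)).getD (pvBlank columns k))

def pvScatter (rows : List (List (String × String))) (out : List (List (String × String))) : List (List (String × String)) :=
  rows.foldl
    (fun out row =>
      match pvIdx31.get? (pvYear row) with
      | some slot => out.set slot.toNat row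
      | none => out)
    out

lemma pvKeys31_len : pvKeys31.length = 31 := by decide

lemma pvIdx31_keys_nodup : pvIdx31.keys.Nodup := by decide

def pvIdxFold : List Int → Nat → PySem.Dict String Int → PySem.Dict String Int
  | [], _, d => d
  | i :: is, n, d => pvIdxFold is (n + 1) (d.insert (if i == 0 then "At Issue" else PySem.Int.toStr i) (n : Int))

lemma pvInitB_gen (columns : List String) (l : List Int)
    (a : List (List (String × String))) (d : PySem.Dict String Int) :
    l.foldl
      (fun st i =>
        (st.1 ++ [((columns.foldl (fun b col => b.insert col "") PySem.Dict.empty).insert "Year" (if i == 0 then "At Issue" else PySem.Int.toStr i)).items],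
         st.2.insert (if i == 0 then "At Issue" else PySem.Int.toStr i) (st.1.length : Int)))
      (a, d)
    = (a ++ l.map (fun i => pvBlank columns (if i == 0 then "At Issue" else PySem.Int.toStr i)),
       pvIdxFold l a.length d) := by
  induction l generalizing a d with
  | nil => simp [pvIdxFold]
  | cons x xs ih =>
    simp only [List.foldl_cons, List.map_cons, pvIdxFold, ih, pvBlank]
    simp

lemma pvMapKey31 :
    (PySem.List.pyRange 0 31 1).map (fun i => if i == 0 then "At Issue" else PySem.Int.toStr i) = pvKeys31 := by decide

lemma pvIdxFold31 : pvIdxFold (PySem.List.pyRange 0 31 1) 0 PySem.Dict.empty = pvIdx31 := by decide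

lemma pvInitB_eq (columns : List String) :
    pvInitB columns = (pvKeys31.map (pvBlank columns), pvIdx31) := by
  unfold pvInitB
  rw [pvInitB_gen]
  rw [← pvMapKey31, ← pvIdxFold31, List.map_map]
  simp [Function.comp]

lemma pvIdx31_get_key : ∀ i : Fin 31, pvIdx31.get? (pvKeys31.getD i.val "") = some (i.val : Int) := by decide

lemma pvIdx31_get_some {k : String} {j : Int} (h : pvIdx31.get? k = some j) :
    0 ≤ j ∧ j < 31 ∧ pvKeys31.getD j.toNat "" = k := by
  rw [PySem.Dict.get?_eq_some_iff_mem_items pvIdx31 k j pvIdx31_keys_nodup] at h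
  simp only [pvIdx31, List.mem_cons, List.not_mem_nil, or_false, Prod.mk.injEq] at h
  rcases h with ⟨rfl, rfl⟩|⟨rfl, rfl⟩|⟨rfl, rfl⟩|⟨rfl, rfl⟩|⟨rfl, rfl⟩|⟨rfl, rfl⟩|⟨rfl, rfl⟩|⟨rfl, rfl⟩|⟨rfl, rfl⟩|⟨rfl, rfl⟩|⟨rfl, rfl⟩|⟨rfl, rfl⟩|⟨rfl, rfl⟩|⟨rfl, rfl⟩|⟨rfl, rfl⟩|⟨rfl, rfl⟩|⟨rfl, rfl⟩|⟨rfl, rfl⟩|⟨rfl, rfl⟩|⟨rfl, rfl⟩|⟨rfl, rfl⟩|⟨rfl, rfl⟩|⟨rfl, rfl⟩|⟨rfl, rfl⟩|⟨rfl, rfl⟩|⟨rfl, rfl⟩|⟨rfl, rfl⟩|⟨rfl, rfl⟩|⟨rfl, rfl⟩|⟨rfl, rfl⟩|⟨rfl, rfl⟩ <;> decide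

-- A's row_map lookup is "last row with this Year"
lemma pvRowMap_get (rows : List (List (String × String))) (m : PySem.Dict String (List (String × String))) (k : String) :
    (rows.foldl (fun m row => m.insert (pvYear row) row) m).get? k
      = match rows.reverse.find? (fun r => pvYear r == k) with
        | some r => some r
        | none => m.get? k := by
  induction rows generalizing m with
  | nil => rfl
  | cons r rs ih =>
    simp only [List.foldl_cons, List.reverse_cons, List.find?_append, ih]
    cases hf : rs.reverse.find? (fun r => pvYear r == k) with
    | some r' => simp
    | none =>
      simp only [Option.none_or, List.find?_singleton]
      by_cases hy : pvYear r = k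
      · subst hy; simp [PySem.Dict.get?_insert_self]
      · rw [PySem.Dict.get?_insert_of_ne _ _ (fun h => hy h.symm)]
        simp [hy]

lemma pvFoldA (rm : PySem.Dict String (List (String × String))) (columns : List String)
    (l : List String) (acc : List (List (String × String))) :
    l.foldl
      (fun output year_key =>
        if rm.contains year_key then
          output ++ [rm.getD year_key []]
        else
          output ++ [((columns.foldl (fun b col => b.insert col "") PySem.Dict.empty).insert "Year" year_key).items])
      acc
    = acc ++ l.map (fun k => if rm.contains k then rm.getD k [] else pvBlank columns k) := by
  induction l generalizing acc with
  | nil => simp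
  | cons x xs ih =>
    simp only [List.foldl_cons, List.map_cons, ih, pvBlank]
    by_cases hc : rm.contains x = true <;> simp [hc]

-- A equals the canonical description
lemma pvA_eq_canon (rows : List (List (String × String))) (columns : List String) :
    force_31_year_rows_py rows columns = pvCanon rows columns := by
  unfold force_31_year_rows_py pvCanon
  rw [pvFoldA]
  simp only [List.nil_append]
  apply List.map_congr_left
  intro k _
  have hget := pvRowMap_get rows PySem.Dict.empty k
  simp only [pvYear] at hget
  rw [PySem.Dict.contains_eq_isSome_get?, PySem.Dict.getD_eq_get?_getD, hget]
  cases hf : rows.reverse.find? (fun r => (PySem.Dict.mk r).getD "Year" "" == k) with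
  | some r => simp [pvYear, hf]
  | none => simp [pvYear, hf, PySem.Dict.get?_empty]

lemma pvScatter_len (rows : List (List (String × String))) (out : List (List (String × String))) :
    (pvScatter rows out).length = out.length := by
  induction rows generalizing out with
  | nil => rfl
  | cons r rs ih =>
    show (pvScatter rs _).length = _
    cases hg : pvIdx31.get? (pvYear r) <;> simp [hg, ih]

lemma pvScatter_getD (rows : List (List (String × String))) (out : List (List (String × String)))
    (hlen : out.length = 31) (i : Nat) (hi : i < 31) :
    (pvScatter rows out).getD i []
      = (rows.reverse.find? (fun r => pvYear r == pvKeys31.getD i "")).getD (out.getD i []) := by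
  induction rows generalizing out with
  | nil => rfl
  | cons r rs ih =>
    show (pvScatter rs (match pvIdx31.get? (pvYear r) with
        | some slot => out.set slot.toNat r
        | none => out)).getD i [] = _
    have hlen' : (match pvIdx31.get? (pvYear r) with
        | some slot => out.set slot.toNat r
        | none => out).length = 31 := by
      cases pvIdx31.get? (pvYear r) <;> simp [hlen]
    rw [ih _ hlen']
    simp only [List.reverse_cons, List.find?_append, List.find?_singleton]
    cases hf : rs.reverse.find? (fun r => pvYear r == pvKeys31.getD i "") with
    | some r' => simp
    | none =>
      simp only [Option.none_or]
      by_cases hy : pvYear r = pvKeys31.getD i ""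
      · have hk := pvIdx31_get_key ⟨i, hi⟩
        simp only [hy, beq_self_eq_true, hk, Option.getD_none, Int.toNat_natCast]
        rw [List.getD_eq_getElem?_getD, List.getElem?_set]
        simp [hlen, hi]
      · have hb : (pvYear r == pvKeys31.getD i "") = false := beq_eq_false_iff_ne.mpr hy
        simp only [hb, Bool.false_eq_true, if_false, Option.getD_none]
        cases hg : pvIdx31.get? (pvYear r) with
        | none => rfl
        | some s =>
          obtain ⟨h0, h31, hkey⟩ := pvIdx31_get_some hg
          have hne : s.toNat ≠ i := by
            intro he
            exact hy (by rw [← hkey, he])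
          rw [List.getD_eq_getElem?_getD, List.getElem?_set, if_neg hne, ← List.getD_eq_getElem?_getD]

-- B equals the canonical description
lemma pvB_eq_canon (rows : List (List (String × String))) (columns : List String) :
    force_31_year_rows_py_alt rows columns = pvCanon rows columns := by
  simp only [force_31_year_rows_py_alt, pvInitB_eq]
  show pvScatter rows (pvKeys31.map (pvBlank columns)) = pvCanon rows columns
  have hlen : (pvKeys31.map (pvBlank columns)).length = 31 := by
    rw [List.length_map, pvKeys31_len]
  apply List.ext_getElem
  · rw [pvScatter_len, hlen]
    unfold pvCanon
    rw [List.length_map, pvKeys31_len]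
  · intro i hi1 hi2
    have hi : i < 31 := by rwa [pvScatter_len, hlen] at hi1
    rw [← List.getD_eq_getElem _ [] hi1, ← List.getD_eq_getElem _ [] hi2]
    rw [pvScatter_getD rows _ hlen i hi]
    have hikey : i < pvKeys31.length := by rw [pvKeys31_len]; exact hi
    have hkey : pvKeys31.getD i "" = pvKeys31[i] := List.getD_eq_getElem _ _ hikey
    unfold pvCanon
    rw [List.getD_eq_getElem?_getD (l := pvKeys31.map (pvBlank columns)),
        List.getD_eq_getElem?_getD (l := pvKeys31.map fun k => (rows.reverse.find? (fun r => pvYear r == k)).getD (pvBlank columns k))]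
    rw [List.getElem?_map, List.getElem?_map, List.getElem?_eq_getElem hikey]
    simp [List.getElem?_eq_getElem hikey]

-- ===== VERDICT (by name: the statement is the Claim_ definition above) =====
theorem force_31_year_rows_py_spec : Claim_equal_force_31_year_rows_py := by
  intro rows columns _
  unfold Spec_force_31_year_rows_py
  rw [pvA_eq_canon, pvB_eq_canon]
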